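-- pv_equiv track=rewrite | github.com/sipb/homeworld | platform/bazel/version-compute.py | is_later
-- ===== SOURCE A (Python) =====
-- def is_later(a, b):
--     if not a:
--         return False
--     elif not b:
--         return True
--     elif a[0] == b[0]:
--         return is_later(a[1:], b[1:])
--     elif a[0] > b[0]:
--         return True
--     else:
--         return False
-- ===== SOURCE B (Python) =====
-- def is_later(a, b):
--     for x, y in zip(a, b):
--         if x == y:
--             continue
--         return x > y
--     return len(a) > len(b)
-- ===== Notes on version B (the rewrite author's own statement) =====
-- stated objective: idiomatic
-- what changed: Replaces the tail recursion with per-call slicing by a single iterative forward pass over zip(a, b) with a trailing length comparison for the prefix-exhaustion cases.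
import Mathlib
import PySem

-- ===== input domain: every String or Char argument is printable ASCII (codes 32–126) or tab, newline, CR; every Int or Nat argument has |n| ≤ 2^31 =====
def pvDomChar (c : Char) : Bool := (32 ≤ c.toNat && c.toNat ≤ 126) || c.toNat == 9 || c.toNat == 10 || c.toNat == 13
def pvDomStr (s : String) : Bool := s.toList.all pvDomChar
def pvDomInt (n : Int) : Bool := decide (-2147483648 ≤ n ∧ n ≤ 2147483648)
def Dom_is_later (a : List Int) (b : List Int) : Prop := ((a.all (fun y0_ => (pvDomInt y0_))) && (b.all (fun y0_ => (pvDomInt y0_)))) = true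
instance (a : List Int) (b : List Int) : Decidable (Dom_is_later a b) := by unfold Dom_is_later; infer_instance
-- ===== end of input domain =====

-- B replaces A's slicing tail recursion with one forward pass over the zipped lists plus a trailing length comparison (idiomatic/linear).

-- ===== PORT A =====
def is_later (a : List Int) (b : List Int) : Bool :=
  match a, b with
  | [], _ => false                    -- if not a: return False
  | _ :: _, [] => true                -- elif not b: return True
  | x :: as_, y :: bs =>
    if x == y then is_later as_ bs    -- elif a[0] == b[0]: recurse on tails (a[1:], b[1:])
    else if x > y then true
    else false

-- ===== PORT B =====
-- the 'for x, y in zip(a, b)' loop with early return: none = loop fell through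
def isLaterLoop : List (Int × Int) → Option Bool
  | [] => none
  | (x, y) :: rest => if x == y then isLaterLoop rest else some (x > y)

def is_later_alt (a : List Int) (b : List Int) : Bool :=
  match isLaterLoop (a.zip b) with
  | some r => r
  | none => a.length > b.length       -- return len(a) > len(b)

-- ===== PRECONDITION & SPEC =====
def Spec_is_later (a : List Int) (b : List Int) (out : Bool) : Prop := out = is_later_alt a b
instance (a : List Int) (b : List Int) (out : Bool) : Decidable (Spec_is_later a b out) := by unfold Spec_is_later; infer_instance

-- ===== CLAIM (what is proved, stated in full; the proofs are below) =====
def Claim_equal_is_later : Prop := ∀ (a : List Int) (b : List Int), Dom_is_later a b → Spec_is_later a b (is_later a b)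

-- ===== LEMMAS AND PROOFS =====
theorem is_later_eq_alt : ∀ (a b : List Int), is_later a b = is_later_alt a b := by
  intro a
  induction a with
  | nil =>
    intro b
    cases b <;> simp [is_later, is_later_alt, isLaterLoop]
  | cons x as_ ih =>
    intro b
    cases b with
    | nil => simp [is_later, is_later_alt, isLaterLoop]
    | cons y bs =>
      by_cases h : x = y
      · subst h
        simp [is_later, is_later_alt, isLaterLoop, ih bs]
      · by_cases hgt : x > y <;>
          simp [is_later, is_later_alt, isLaterLoop, h, hgt]

-- ===== VERDICT (by name: the statement is the Claim_ definition above) =====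
theorem is_later_spec : Claim_equal_is_later := by
  intro a b _
  exact is_later_eq_alt a b
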